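-- pv_equiv track=rewrite | github.com/EHOTIK911/Inform-EGE | 23/23.5.py | f
-- ===== SOURCE A (Python) =====
-- def f(start, x):
--     if x < start:
--         return 0
--     if x == start:
--         return 1
--     if x == 24:
--         return 0
--     K = f(start, x - 1)
--     if x % 2 != 0:
--         K += f(start, x // 2)
--     return K
-- ===== SOURCE B (Python) =====
-- def f(start, x):
--     # Bottom-up DP: one linear pass from start to x, remembering past counts
--     # in a dict for the halving lookups (instead of A's naive recursion).
--     if x < start:
--         return 0
--     cnt = {start: 1}
--     cur = 1
--     for v in range(start + 1, x + 1):
--         cur = 0 if v == 24 else cur + (cnt.get(v // 2, 0) if v % 2 != 0 else 0)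
--         cnt[v] = cur
--     return cur
-- ===== Notes on version B (the rewrite author's own statement) =====
-- stated objective: faster
-- what changed: Replaced A's naive branching recursion with a single bottom-up dynamic-programming pass from start to x that keeps a running count plus a dict of past counts for the halving lookups.
import Mathlib
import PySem

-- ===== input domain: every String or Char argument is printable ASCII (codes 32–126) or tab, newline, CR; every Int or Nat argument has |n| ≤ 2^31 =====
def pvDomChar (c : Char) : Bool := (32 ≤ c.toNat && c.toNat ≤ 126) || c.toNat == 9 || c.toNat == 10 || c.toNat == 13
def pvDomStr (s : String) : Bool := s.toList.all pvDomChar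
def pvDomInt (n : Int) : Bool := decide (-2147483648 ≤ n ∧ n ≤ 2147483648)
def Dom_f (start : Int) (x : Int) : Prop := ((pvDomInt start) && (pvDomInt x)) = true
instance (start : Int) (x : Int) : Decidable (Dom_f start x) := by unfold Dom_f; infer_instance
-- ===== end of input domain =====

-- B replaces A's naive branching recursion by one bottom-up DP pass over [start, x].


-- ===== PORT A =====
-- fuel only makes the recursion total; on every input admitted by Pre_f the
-- initial fuel (x - start).toNat + 1 exceeds the recursion depth, so no branch
-- ever hits fuel 0 (proved by fA_stable below).
def fA (start : Int) (fuel : Nat) (x : Int) : Int :=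
  match fuel with
  | 0 => 0
  | Nat.succ fuel =>
    if x < start then 0
    else if x = start then 1
    else if x = 24 then 0
    else
      let K := fA start fuel (x - 1)
      if PySem.Int.mod x 2 ≠ 0 then K + fA start fuel (PySem.Int.floordiv x 2) else K

def f (start : Int) (x : Int) : Int := fA start ((x - start).toNat + 1) x

-- ===== PORT B =====
-- one DP step of Source B's loop body: state = (cnt, cur)
def bStep (st : PySem.Dict Int Int × Int) (v : Int) : PySem.Dict Int Int × Int :=
  let cur := if v = 24 then 0
             else st.2 + (if PySem.Int.mod v 2 ≠ 0 then st.1.getD (PySem.Int.floordiv v 2) 0 else 0)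
  (st.1.insert v cur, cur)

def f_alt (start : Int) (x : Int) : Int :=
  if x < start then 0
  else ((PySem.List.pyRange (start + 1) (x + 1) 1).foldl bStep
          ((PySem.Dict.empty).insert start 1, 1)).2

-- ===== PRECONDITION & SPEC =====
-- Pre_f excludes exactly the inputs with start ≤ -2 < x (other than the even successor
-- x = start + 1) on which the Python A's recursion cycles through negative values
-- (e.g. f(start, -1) calls f(start, -1 // 2) = f(start, -1)) and raises RecursionError.
def Pre_f (start : Int) (x : Int) : Prop :=
  x ≤ start ∨ -1 ≤ start ∨ (x = start + 1 ∧ PySem.Int.mod x 2 = 0)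
instance (start : Int) (x : Int) : Decidable (Pre_f start x) := by unfold Pre_f; infer_instance
def pvWitness_f : Int × Int := (0, 10)

def Spec_f (start : Int) (x : Int) (out : Int) : Prop := out = f_alt start x
instance (start : Int) (x : Int) (out : Int) : Decidable (Spec_f start x out) := by unfold Spec_f; infer_instance

-- ===== CLAIM (what is proved, stated in full; the proofs are below) =====
def Claim_equal_f : Prop := ∀ (start : Int) (x : Int), Dom_f start x → Pre_f start x → Spec_f start x (f start x)
-- ===== LEMMAS AND PROOFS =====

lemma f_of_lt (start x : Int) (h : x < start) : f start x = 0 := by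
  simp [f, fA, h]

lemma f_of_eq (start : Int) : f start start = 1 := by
  simp [f, fA]

-- fuel irrelevance: any two fuels above the measure give the same value (start ≥ -1)
lemma fA_stable (start : Int) (hs : -1 ≤ start) :
    ∀ (k : Nat) (x : Int) (n m : Nat), (x - start).toNat ≤ k → k < n → k < m →
      fA start n x = fA start m x := by
  intro k
  induction k using Nat.strong_induction_on with
  | _ k ih =>
    intro x n m hx hn hm
    obtain ⟨n', rfl⟩ : ∃ n', n = n' + 1 := ⟨n - 1, by omega⟩
    obtain ⟨m', rfl⟩ : ∃ m', m = m' + 1 := ⟨m - 1, by omega⟩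
    simp only [fA]
    by_cases h1 : x < start
    · simp [h1]
    by_cases h2 : x = start
    · simp [h2]
    by_cases h3 : x = 24
    · simp [h3]
    have hgt : start < x := by omega
    have hmeas : 1 ≤ (x - start).toNat := by omega
    have e1 : fA start n' (x - 1) = fA start m' (x - 1) := by
      apply ih ((x - 1 - start).toNat) (by omega) _ _ _ (le_refl _) (by omega) (by omega)
    have hmm : PySem.Int.mod x 2 = x % 2 := PySem.Int.mod_eq_emod_of_pos (by omega)
    by_cases hm2 : x % 2 = 1
    · have hxpos : 1 ≤ x := by omega
      have e2 : fA start n' (x / 2) = fA start m' (x / 2) := by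
        apply ih ((x - 1 - start).toNat) (by omega) _ _ _ (by omega) (by omega) (by omega)
      simp [h2, h3, hm2, e1, e2]
    · have hm0 : x % 2 = 0 := by omega
      simp [h2, h3, hm0, e1]

-- A's recurrence, with both recursive calls at their own canonical fuel
lemma fA_succ (start : Int) (fuel : Nat) (x : Int) :
    fA start (fuel + 1) x =
      if x < start then 0
      else if x = start then 1
      else if x = 24 then 0
      else
        let K := fA start fuel (x - 1)
        if PySem.Int.mod x 2 ≠ 0 then K + fA start fuel (PySem.Int.floordiv x 2) else K := rfl

lemma f_rec (start x : Int) (hs : -1 ≤ start) (hgt : start < x) :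
    f start x = if x = 24 then 0
                else f start (x - 1) +
                     (if PySem.Int.mod x 2 ≠ 0 then f start (PySem.Int.floordiv x 2) else 0) := by
  have h1 : ¬ x < start := by omega
  have h2 : x ≠ start := by omega
  have hmeas : 1 ≤ (x - start).toNat := by omega
  have hmm : PySem.Int.mod x 2 = x % 2 := PySem.Int.mod_eq_emod_of_pos (by omega)
  have hfd : PySem.Int.floordiv x 2 = x / 2 := PySem.Int.floordiv_eq_ediv_of_pos (by omega)
  rw [show f start x = fA start (((x - start).toNat - 1) + 1 + 1) x from by rw [f]; congr 2; omega]
  rw [fA_succ]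
  by_cases h3 : x = 24
  · simp only [h3]; simp; omega
  simp only [if_neg h1, if_neg h2, if_neg h3]
  have e1 : fA start ((x - start).toNat - 1 + 1) (x - 1) = f start (x - 1) := by
    rw [f]
    exact fA_stable start hs ((x - 1 - start).toNat) _ _ _ (le_refl _) (by omega) (by omega)
  rw [hmm]
  by_cases hm2 : x % 2 = 1
  · have hxpos : 1 ≤ x := by omega
    have e2 : fA start ((x - start).toNat - 1 + 1) (PySem.Int.floordiv x 2)
            = f start (PySem.Int.floordiv x 2) := by
      rw [f]
      apply fA_stable start hs ((PySem.Int.floordiv x 2 - start).toNat) _ _ _ (le_refl _) ?_ (by omega)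
      rw [hfd]; omega
    rw [hfd] at e2
    simp [hm2, e1, e2]
  · have hm0 : x % 2 = 0 := by omega
    simp [hm0, e1]

-- loop invariant of B's DP pass: after processing start+1 .. v, the running value is
-- f start v and the dict answers f start u for every u ≤ v
lemma alt_inv (start : Int) (hs : -1 ≤ start) :
    ∀ (k : Nat) (v : Int), start ≤ v → (v - start).toNat = k →
      (((PySem.List.pyRange (start + 1) (v + 1) 1).foldl bStep ((PySem.Dict.empty).insert start 1, 1)).2
         = f start v)
      ∧ (∀ u : Int, u ≤ v →
          (((PySem.List.pyRange (start + 1) (v + 1) 1).foldl bStep ((PySem.Dict.empty).insert start 1, 1)).1).getD u 0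
            = f start u) := by
  intro k
  induction k with
  | zero =>
    intro v hv hk
    have hv' : v = start := by omega
    subst hv'
    rw [PySem.List.pyRange_one_eq_nil (by omega)]
    constructor
    · simpa using (f_of_eq v).symm
    · intro u hu
      rcases eq_or_lt_of_le hu with h | h
      · subst h
        simp [f_of_eq]
      · rw [f_of_lt v u h]
        simp only [List.foldl_nil]
        rw [PySem.Dict.getD_insert]
        simp [show u ≠ v by omega]
  | succ k ih =>
    intro v hv hk
    have hgt : start < v := by omega
    obtain ⟨h2, h1⟩ := ih (v - 1) (by omega) (by omega)
    rw [show v - 1 + 1 = v by ring] at h2 h1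
    rw [PySem.List.pyRange_one_succ_right (by omega), List.foldl_append]
    set st := (PySem.List.pyRange (start + 1) v 1).foldl bStep ((PySem.Dict.empty).insert start 1, 1) with hst
    have hcur : (bStep st v).2 = f start v := by
      rw [f_rec start v hs hgt]
      simp only [bStep]
      by_cases h24 : v = 24
      · simp [h24]
      have hmm : PySem.Int.mod v 2 = v % 2 := PySem.Int.mod_eq_emod_of_pos (by omega)
      have hfd : PySem.Int.floordiv v 2 = v / 2 := PySem.Int.floordiv_eq_ediv_of_pos (by omega)
      by_cases hm2 : v % 2 = 1
      · have hvpos : 1 ≤ v := by omega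
        have hhalf : st.1.getD (v / 2) 0 = f start (v / 2) := by
          apply h1; omega
        simp [h24, hm2, h2, hhalf]
      · have hm0 : v % 2 = 0 := by omega
        simp [h24, hm0, h2]
    refine ⟨by simpa [List.foldl_cons, List.foldl_nil] using hcur, ?_⟩
    intro u hu
    simp only [List.foldl_cons, List.foldl_nil]
    have hins : (bStep st v).1 = st.1.insert v (bStep st v).2 := rfl
    rw [hins, PySem.Dict.getD_insert]
    by_cases huv : u = v
    · simp [huv, hcur]
    · simp only [huv, if_false]
      exact h1 u (by omega)

-- ===== VERDICT (by name: the statement is the Claim_ definition above) =====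
theorem f_spec : Claim_equal_f := by
  intro start x _ hpre
  unfold Spec_f
  by_cases hlt : x < start
  · rw [f_of_lt start x hlt]; simp [f_alt, hlt]
  rcases hpre with h | h | h
  · have hx : x = start := by omega
    subst hx
    simp [f_alt, f_of_eq, PySem.List.pyRange_one_eq_nil (show x + 1 ≤ x + 1 by omega)]
  · have hle : start ≤ x := by omega
    obtain ⟨h2, _⟩ := alt_inv start h ((x - start).toNat) x hle rfl
    simp [f_alt, hlt, h2]
  · -- x = start + 1 and x even: one loop iteration, both sides give (if x = 24 then 0 else 1)
    obtain ⟨hx, hm⟩ := h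
    subst hx
    have hm' : (start + 1) % 2 = 0 := by
      rwa [PySem.Int.mod_eq_emod_of_pos (by omega)] at hm
    unfold f f_alt
    rw [show (start + 1 - start).toNat + 1 = 2 by omega]
    rw [show start + 1 + 1 = (start + 1) + 1 by ring, PySem.List.pyRange_one_singleton]
    simp only [fA, bStep, List.foldl_cons, List.foldl_nil]
    simp [show ¬ (start + 1 < start) by omega, show start + 1 ≠ start by omega, hm']
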